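-- pv_equiv track=rewrite | github.com/manojlds/adk-deepagents | adk_deepagents/tools/task_dynamic.py | _normalized_task_history
-- ===== SOURCE A (Python) =====
-- from typing import Any, cast
--
-- _TASK_HISTORY_MAX_ENTRIES = 12
--
-- _TASK_HISTORY_MAX_PROMPT_CHARS = 1200
--
-- _TASK_HISTORY_MAX_RESULT_CHARS = 2400
--
-- def _truncate_history_text(value: Any, *, max_chars: int) -> str:
--     if not isinstance(value, str):
--         return ""
--     text = value.strip()
--     if len(text) <= max_chars:
--         return text
--     return text[:max_chars] + "..."
--
-- def _normalized_task_history(value: Any) -> list[dict[str, str]]: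
--     if not isinstance(value, list):
--         return []
--
--     normalized: list[dict[str, str]] = []
--     for item in value:
--         if not isinstance(item, dict):
--             continue
--
--         prompt = _truncate_history_text(
--             item.get("prompt"), max_chars=_TASK_HISTORY_MAX_PROMPT_CHARS
--         )
--         result = _truncate_history_text(
--             item.get("result"), max_chars=_TASK_HISTORY_MAX_RESULT_CHARS
--         )
--         if not prompt and not result:
--             continue
--
--         normalized.append({"prompt": prompt, "result": result})
--
--     return normalized[-_TASK_HISTORY_MAX_ENTRIES:]
-- ===== SOURCE B (Python) =====
-- _TASK_HISTORY_MAX_ENTRIES = 12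
--
-- _TASK_HISTORY_MAX_PROMPT_CHARS = 1200
--
-- _TASK_HISTORY_MAX_RESULT_CHARS = 2400
--
-- def _truncate_history_text(value, *, max_chars):
--     if not isinstance(value, str):
--         return ""
--     text = value.strip()
--     if len(text) <= max_chars:
--         return text
--     return text[:max_chars] + "..."
--
-- def _normalized_task_history(value):
--     if not isinstance(value, list):
--         return []
--
--     kept = []
--     for item in reversed(value):
--         if not isinstance(item, dict):
--             continue
--
--         prompt = _truncate_history_text(
--             item.get("prompt"), max_chars=_TASK_HISTORY_MAX_PROMPT_CHARS
--         )
--         result = _truncate_history_text(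
--             item.get("result"), max_chars=_TASK_HISTORY_MAX_RESULT_CHARS
--         )
--         if not prompt and not result:
--             continue
--
--         kept.append({"prompt": prompt, "result": result})
--         if len(kept) == _TASK_HISTORY_MAX_ENTRIES:
--             break
--
--     kept.reverse()
--     return kept
-- ===== Notes on version B (the rewrite author's own statement) =====
-- stated objective: alternative
-- what changed: B scans the list in reverse, collecting normalized entries into a buffer and breaking as soon as 12 are kept, then reverses the buffer, instead of A's normalize-everything pass followed by a [-12:] slice.
import Mathlib
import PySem

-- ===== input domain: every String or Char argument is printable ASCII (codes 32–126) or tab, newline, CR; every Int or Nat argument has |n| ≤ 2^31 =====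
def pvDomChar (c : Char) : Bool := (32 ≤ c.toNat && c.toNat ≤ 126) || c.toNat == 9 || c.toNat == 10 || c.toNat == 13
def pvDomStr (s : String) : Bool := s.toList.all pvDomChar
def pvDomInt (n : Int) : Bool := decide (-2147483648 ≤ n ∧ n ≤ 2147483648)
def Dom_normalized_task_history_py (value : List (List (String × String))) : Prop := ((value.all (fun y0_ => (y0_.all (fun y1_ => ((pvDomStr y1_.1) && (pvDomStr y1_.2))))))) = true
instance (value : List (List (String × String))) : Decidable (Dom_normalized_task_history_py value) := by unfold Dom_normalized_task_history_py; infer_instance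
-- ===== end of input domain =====

-- B replaces A's "build everything, then slice off the last 12" with a reverse scan that
-- stops as soon as 12 kept entries are collected and finally reverses the buffer (objective:
-- alternative decomposition; same result, avoids normalizing entries the slice would drop).

-- ===== PORT A =====
-- item.get(k): first match in the association list (the type convention's dict lookup)
def pvGet (d : List (String × String)) (k : String) : Option String :=
  (d.find? (fun kv => kv.1 == k)).map (·.2)

-- _truncate_history_text, shared by both Pythons: value is Optional[str] here (None = missing
-- key → ""); strip/len/take/++ on code-point lists are exact for str.strip, len, s[:m], +.
def pvTrunc (v : Option String) (maxChars : Nat) : String :=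
  match v with
  | none => ""
  | some s =>
    let text := PySem.Chars.strip s.toList
    if text.length ≤ maxChars then String.ofList text
    else String.ofList (text.take maxChars ++ ['.', '.', '.'])

def normalized_task_history_py (value : List (List (String × String))) : List (List (String × String)) :=
  let normalized := value.foldl (fun acc item =>
    let prompt := pvTrunc (pvGet item "prompt") 1200
    let result := pvTrunc (pvGet item "result") 2400
    if prompt = "" ∧ result = "" then acc
    else acc ++ [[("prompt", prompt), ("result", result)]]) []
  PySem.List.slice normalized (some (-12)) none    -- normalized[-12:]

-- ===== PORT B =====
-- the reversed(value) loop of Source B: kept.append(...) then break at 12; kept.reverse() at the end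
def pvGoB : List (List (String × String)) → List (List (String × String)) → List (List (String × String))
  | [], kept => kept.reverse
  | item :: rest, kept =>
    let prompt := pvTrunc (pvGet item "prompt") 1200
    let result := pvTrunc (pvGet item "result") 2400
    if prompt = "" ∧ result = "" then pvGoB rest kept
    else
      let kept' := kept ++ [[("prompt", prompt), ("result", result)]]
      if kept'.length = 12 then kept'.reverse
      else pvGoB rest kept'

def normalized_task_history_py_alt (value : List (List (String × String))) : List (List (String × String)) :=
  pvGoB value.reverse []

-- ===== PRECONDITION & SPEC =====
def Spec_normalized_task_history_py (value : List (List (String × String))) (out : List (List (String × String))) : Prop := out = normalized_task_history_py_alt value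
instance (value : List (List (String × String))) (out : List (List (String × String))) : Decidable (Spec_normalized_task_history_py value out) := by unfold Spec_normalized_task_history_py; infer_instance

-- ===== CLAIM (what is proved, stated in full; the proofs are below) =====
def Claim_equal_normalized_task_history_py : Prop := ∀ (value : List (List (String × String))), Dom_normalized_task_history_py value → Spec_normalized_task_history_py value (normalized_task_history_py value)

-- ===== LEMMAS AND PROOFS =====

-- the per-item normalization both loops perform: `none` = skipped item
def pvF (item : List (String × String)) : Option (List (String × String)) :=
  let prompt := pvTrunc (pvGet item "prompt") 1200
  let result := pvTrunc (pvGet item "result") 2400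
  if prompt = "" ∧ result = "" then none
  else some [("prompt", prompt), ("result", result)]

theorem pvF_none (item : List (String × String))
    (h : pvTrunc (pvGet item "prompt") 1200 = "" ∧ pvTrunc (pvGet item "result") 2400 = "") :
    pvF item = none := by simp [pvF, h]

theorem pvF_some (item : List (String × String))
    (h : ¬(pvTrunc (pvGet item "prompt") 1200 = "" ∧ pvTrunc (pvGet item "result") 2400 = "")) :
    pvF item = some [("prompt", pvTrunc (pvGet item "prompt") 1200), ("result", pvTrunc (pvGet item "result") 2400)] := by
  simp only [pvF]
  rw [if_neg h]

theorem pvFoldA (l : List (List (String × String))) (acc : List (List (String × String))) :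
    l.foldl (fun acc item =>
      let prompt := pvTrunc (pvGet item "prompt") 1200
      let result := pvTrunc (pvGet item "result") 2400
      if prompt = "" ∧ result = "" then acc
      else acc ++ [[("prompt", prompt), ("result", result)]]) acc
    = acc ++ l.filterMap pvF := by
  induction l generalizing acc with
  | nil => simp
  | cons item rest ih =>
    simp only [List.foldl_cons, List.filterMap_cons]
    by_cases h : pvTrunc (pvGet item "prompt") 1200 = "" ∧ pvTrunc (pvGet item "result") 2400 = ""
    · rw [pvF_none item h]; simp only [if_pos h, ih]
    · rw [pvF_some item h]; simp only [if_neg h, ih]; simp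

theorem pvGoB_eq (l : List (List (String × String))) (kept : List (List (String × String)))
    (h : kept.length < 12) :
    pvGoB l kept = (kept ++ (l.filterMap pvF).take (12 - kept.length)).reverse := by
  induction l generalizing kept with
  | nil => simp [pvGoB]
  | cons item rest ih =>
    simp only [pvGoB, List.filterMap_cons]
    by_cases hskip : pvTrunc (pvGet item "prompt") 1200 = "" ∧ pvTrunc (pvGet item "result") 2400 = ""
    · rw [pvF_none item hskip]
      simp only [if_pos hskip, ih kept h]
    · rw [pvF_some item hskip]
      simp only [if_neg hskip]
      set e := [("prompt", pvTrunc (pvGet item "prompt") 1200), ("result", pvTrunc (pvGet item "result") 2400)] with he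
      by_cases hfull : (kept ++ [e]).length = 12
      · rw [if_pos hfull]
        simp only [List.length_append, List.length_cons, List.length_nil] at hfull
        have h1 : 12 - kept.length = 1 := by omega
        simp [h1]
      · rw [if_neg hfull]
        have h2 : (kept ++ [e]).length < 12 := by
          simp only [List.length_append, List.length_cons, List.length_nil] at hfull ⊢
          omega
        rw [ih _ h2]
        have h3 : 12 - kept.length = (12 - (kept ++ [e]).length) + 1 := by
          simp only [List.length_append, List.length_cons, List.length_nil]
          omega
        simp [h3, List.take_succ_cons]

-- ===== VERDICT (by name: the statement is the Claim_ definition above) =====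
theorem normalized_task_history_py_spec : Claim_equal_normalized_task_history_py := by
  intro value _
  show normalized_task_history_py value = normalized_task_history_py_alt value
  unfold normalized_task_history_py normalized_task_history_py_alt
  rw [pvFoldA, pvGoB_eq _ _ (by simp)]
  rw [PySem.List.slice_from_neg_ofNat _ 12 (by omega)]
  simp only [List.nil_append, List.filterMap_reverse, List.length_nil, Nat.sub_zero]
  rw [List.take_reverse, List.reverse_reverse]
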